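-- pv_equiv track=rewrite | github.com/spec2e/aind2-rnn | my_answers.py | cleaned_text
-- ===== SOURCE A (Python) =====
-- def cleaned_text(text):
--     punctuation = ['!', ',', '.', ':', ';', '?']
--
--     def is_ascii_letter(ch):
--         ascii_value = ord(ch)
--         return ascii_value > 96 and ascii_value < 123
--
--     text = list(text)
--     for i, char in enumerate(text):
--         if not char in punctuation and not is_ascii_letter(char):
--             text[i] = ' '
--
--     text = ''.join(text)
--
--     return text
-- ===== SOURCE B (Python) =====
-- import re
--
-- def cleaned_text(text):
--     return re.sub(r'[^a-z!,.:;?]', ' ', text)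
-- ===== Notes on version B (the rewrite author's own statement) =====
-- stated objective: idiomatic
-- what changed: Replaced the list-conversion, enumerate loop with per-char ord checks, punctuation-list membership and index assignment plus join by a single regular-expression substitution whose negated character class keeps exactly lowercase letters and the six punctuation marks.
import Mathlib
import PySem

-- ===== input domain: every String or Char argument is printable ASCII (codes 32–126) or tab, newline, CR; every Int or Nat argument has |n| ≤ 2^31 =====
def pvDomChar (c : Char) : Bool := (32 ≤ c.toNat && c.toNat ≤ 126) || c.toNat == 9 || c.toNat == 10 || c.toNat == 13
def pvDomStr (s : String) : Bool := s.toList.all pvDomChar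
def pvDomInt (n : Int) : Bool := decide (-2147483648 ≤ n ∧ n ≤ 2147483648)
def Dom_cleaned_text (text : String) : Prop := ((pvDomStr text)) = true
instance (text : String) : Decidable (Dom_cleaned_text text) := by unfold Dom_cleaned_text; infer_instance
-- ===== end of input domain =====

-- B replaces A's list-mutation loop (ord checks + punctuation-list membership + join)
-- by a single regex substitution; objective: idiomatic.

-- ===== PORT A =====
-- A's punctuation list
def cleanedPunctuation : List Char := ['!', ',', '.', ':', ';', '?']

-- A's is_ascii_letter helper: 96 < ord ch < 123
def cleanedIsAsciiLetter (ch : Char) : Bool := 96 < ch.toNat && ch.toNat < 123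

-- the enumerate loop over list(text): position i is overwritten with ' ' when its
-- char is neither in the punctuation list nor an ascii letter; the in-place
-- assignment of each position from its own char is ported as structural recursion.
def cleanedLoopA : List Char → List Char
  | [] => []
  | ch :: rest =>
      (if !(cleanedPunctuation.contains ch) && !(cleanedIsAsciiLetter ch) then ' ' else ch)
        :: cleanedLoopA rest

def cleaned_text (text : String) : String := String.mk (cleanedLoopA text.toList)

-- ===== PORT B =====
-- Source B: re.sub(r'[^a-z!,.:;?]', ' ', text).  The regex engine substitutes ' '
-- for every char outside the single-char class [a-z!,.:;?]; ported exactly as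
-- that per-char-class substitution mapped over the string.
def cleanedClassB (ch : Char) : Bool :=
  ('a' ≤ ch && ch ≤ 'z') || ch == '!' || ch == ',' || ch == '.' || ch == ':' || ch == ';' || ch == '?'

def cleaned_text_alt (text : String) : String :=
  String.mk (text.toList.map (fun ch => if cleanedClassB ch then ch else ' '))

-- ===== PRECONDITION & SPEC =====
def Spec_cleaned_text (text : String) (out : String) : Prop := out = cleaned_text_alt text
instance (text : String) (out : String) : Decidable (Spec_cleaned_text text out) := by unfold Spec_cleaned_text; infer_instance

-- ===== CLAIM (what is proved, stated in full; the proofs are below) =====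
def Claim_equal_cleaned_text : Prop := ∀ (text : String), Dom_cleaned_text text → Spec_cleaned_text text (cleaned_text text)

-- ===== LEMMAS AND PROOFS =====
theorem char_toNat_eq_iff (a b : Char) : (a = b) ↔ a.toNat = b.toNat :=
  ⟨fun h => h ▸ rfl, fun h => Char.ext (UInt32.toNat_inj.mp h)⟩

-- the two per-char tests agree: B keeps a char exactly when A does not blank it
theorem cleaned_char_key (ch : Char) :
    cleanedClassB ch = (cleanedPunctuation.contains ch || cleanedIsAsciiLetter ch) := by
  rw [Bool.eq_iff_iff]
  simp only [cleanedClassB, cleanedPunctuation, cleanedIsAsciiLetter, List.contains_eq_mem,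
    List.mem_cons, List.not_mem_nil, or_false, Bool.or_eq_true, Bool.and_eq_true,
    decide_eq_true_eq, beq_iff_eq, Char.le_def, UInt32.le_iff_toNat_le]
  simp only [char_toNat_eq_iff, Char.toNat]
  have e1 : ('!':Char).val.toNat = 33 := rfl
  have e2 : (',':Char).val.toNat = 44 := rfl
  have e3 : ('.':Char).val.toNat = 46 := rfl
  have e4 : (':':Char).val.toNat = 58 := rfl
  have e5 : (';':Char).val.toNat = 59 := rfl
  have e6 : ('?':Char).val.toNat = 63 := rfl
  have e7 : ('a':Char).val.toNat = 97 := rfl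
  have e8 : ('z':Char).val.toNat = 122 := rfl
  omega

theorem cleanedLoopA_eq_map (l : List Char) :
    cleanedLoopA l = l.map (fun ch => if cleanedClassB ch then ch else ' ') := by
  induction l with
  | nil => rfl
  | cons ch rest ih =>
      simp only [cleanedLoopA, List.map, ih]
      congr 1
      rw [cleaned_char_key]
      cases hc : cleanedPunctuation.contains ch <;> cases hl : cleanedIsAsciiLetter ch <;> simp

-- ===== VERDICT (by name: the statement is the Claim_ definition above) =====
theorem cleaned_text_spec : Claim_equal_cleaned_text := by
  intro text _
  unfold Spec_cleaned_text cleaned_text cleaned_text_alt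
  rw [cleanedLoopA_eq_map]
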